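-- pv_equiv track=rewrite | github.com/anirudhakulkarni/competitive-programming | codeforces/anirudhak47/1353/E.py | fast_consecutize
-- ===== SOURCE A (Python) =====
-- def fast_consecutize(a):
--     if sum(a)==0:
--         return 0
--     n=len(a)
--     dp0=[0]*(n+1)
--     dp1=[0]*(n+1)
--     dp2=[0]*(n+1)
--     rt=n
--     for i in range(n):
--         dp0[i+1]=dp0[i]+a[i]
--         dp1[i+1]=min(dp1[i]+1-a[i],dp0[i]+1-a[i])
--         dp2[i+1]=min(dp2[i]+a[i],dp1[i]+1-a[i],dp0[i])
--
--     return dp2[n]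
-- ===== SOURCE B (Python) =====
-- def fast_consecutize(a):
--     # Staged passes: build the prefix sums of the transformed values v_i = 1 - 2*a[i],
--     # then scan them once with a lagged running maximum; the best (most negative)
--     # adjustment candidate at step i is prefixes[i+1] - max(prefixes[:i]) or -a[i],
--     # and the answer is total + best (best capped at 0 by its initialisation).
--     total = sum(a)
--     if total == 0:
--         return 0
--     prefixes = [0]
--     for x in a:
--         prefixes.append(prefixes[-1] + 1 - 2 * x)
--     m = 0
--     best = 0
--     for p0, p1, x in zip(prefixes, prefixes[1:], a):
--         best = min(best, p1 - m, -x)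
--         m = max(m, p0)
--     return total + best
-- ===== Notes on version B (the rewrite author's own statement) =====
-- stated objective: alternative
-- what changed: Replaces the three (n+1)-size DP arrays updated in one recurrence loop with two staged passes: an explicit prefix-sum list of the transformed values 1-2*x, then a lagged running-maximum scan over it whose best adjustment is added to the total.
import Mathlib
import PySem

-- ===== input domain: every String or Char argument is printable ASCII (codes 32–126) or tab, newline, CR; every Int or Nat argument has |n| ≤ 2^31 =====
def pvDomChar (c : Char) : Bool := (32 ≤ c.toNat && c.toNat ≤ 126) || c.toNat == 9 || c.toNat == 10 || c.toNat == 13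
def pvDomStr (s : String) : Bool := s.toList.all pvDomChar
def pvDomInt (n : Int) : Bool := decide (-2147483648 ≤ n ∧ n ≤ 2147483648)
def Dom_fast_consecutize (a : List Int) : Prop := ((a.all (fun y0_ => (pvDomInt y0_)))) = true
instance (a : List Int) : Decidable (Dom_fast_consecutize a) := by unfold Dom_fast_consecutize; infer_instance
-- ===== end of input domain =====

-- B replaces A's three-array DP fold with two staged passes (an explicit
-- prefix-sum list, then a lagged running-maximum scan); same return value.

-- ===== PORT A =====
-- A's loop reads dp0/dp1/dp2 only at the previous index, so the arrays are
-- ported as the fold state (dp0[i], dp1[i], dp2[i]); same recurrence, same values.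
def fast_consecutize (a : List Int) : Int :=
  if a.foldl (· + ·) 0 = 0 then 0
  else
    let st := a.foldl
      (fun (s : Int × Int × Int) x =>
        (s.1 + x,
         min (s.2.1 + 1 - x) (s.1 + 1 - x),
         min (min (s.2.2 + x) (s.2.1 + 1 - x)) s.1))
      (0, 0, 0)
    st.2.2

-- ===== PORT B =====
-- the `prefixes.append(prefixes[-1] + 1 - 2*x)` loop of Source B (returns prefixes[1:])
def pvBuildPrefixes (p : Int) : List Int → List Int
  | [] => []
  | x :: xs => (p + 1 - 2 * x) :: pvBuildPrefixes (p + 1 - 2 * x) xs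

-- the `for p0, p1, x in zip(prefixes, prefixes[1:], a)` scan step of Source B
def pvScanStep (s : Int × Int) (t : Int × Int × Int) : Int × Int :=
  (max s.1 t.1, min (min s.2 (t.2.1 - s.1)) (-t.2.2))

def fast_consecutize_alt (a : List Int) : Int :=
  let total := a.foldl (· + ·) 0
  if total = 0 then 0
  else
    let tl := pvBuildPrefixes 0 a
    let st := ((0 :: tl).zip (tl.zip a)).foldl pvScanStep (0, 0)
    total + st.2

-- ===== PRECONDITION & SPEC =====
def Spec_fast_consecutize (a : List Int) (out : Int) : Prop := out = fast_consecutize_alt a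
instance (a : List Int) (out : Int) : Decidable (Spec_fast_consecutize a out) := by unfold Spec_fast_consecutize; infer_instance

-- ===== CLAIM (what is proved, stated in full; the proofs are below) =====
def Claim_equal_fast_consecutize : Prop := ∀ (a : List Int), Dom_fast_consecutize a → Spec_fast_consecutize a (fast_consecutize a)

-- ===== LEMMAS AND PROOFS =====

-- final (prefix value, lagged running maximum) pair of B's scan; only used to
-- state the dp1 component of the loop invariant below
def pvD1 (p m : Int) : List Int → Int × Int
  | [] => (p, m)
  | x :: xs => pvD1 (p + 1 - 2 * x) (max m p) xs

-- Invariant: A's fold state stays (S, S + (p - m), S + best) where S is the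
-- running sum of a, p the current transformed prefix, m the lagged running
-- maximum of earlier prefixes and best B's tracked minimum (always ≤ 0).
theorem fast_consecutize_fold (l : List Int) : ∀ (d0 p m best : Int), best ≤ 0 →
    l.foldl
      (fun (s : Int × Int × Int) x =>
        (s.1 + x,
         min (s.2.1 + 1 - x) (s.1 + 1 - x),
         min (min (s.2.2 + x) (s.2.1 + 1 - x)) s.1))
      (d0, d0 + (p - m), d0 + best)
    = (l.foldl (· + ·) d0,
       l.foldl (· + ·) d0 + ((pvD1 p m l).1 - (pvD1 p m l).2),
       l.foldl (· + ·) d0 +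
         (((p :: pvBuildPrefixes p l).zip ((pvBuildPrefixes p l).zip l)).foldl
            pvScanStep (m, best)).2) := by
  induction l with
  | nil => intro d0 p m best _; simp [pvD1, pvBuildPrefixes]
  | cons x l ih =>
    intro d0 p m best hb
    simp only [List.foldl_cons, pvD1, pvBuildPrefixes, List.zip_cons_cons, pvScanStep]
    have h1 : min (d0 + (p - m) + 1 - x) (d0 + 1 - x)
        = (d0 + x) + (p + 1 - 2 * x - max m p) := by omega
    have h2 : min (min (d0 + best + x) (d0 + (p - m) + 1 - x)) d0
        = (d0 + x) + min (min best (p + 1 - 2 * x - m)) (-x) := by omega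
    rw [h1, h2, ih _ _ _ _ (by omega)]

-- ===== VERDICT (by name: the statement is the Claim_ definition above) =====
theorem fast_consecutize_spec : Claim_equal_fast_consecutize := by
  intro a _
  unfold Spec_fast_consecutize fast_consecutize fast_consecutize_alt
  by_cases h : a.foldl (· + ·) 0 = 0
  · simp [h]
  · simp only [h]
    have := fast_consecutize_fold a 0 0 0 0 le_rfl
    simp only [add_zero, sub_zero] at this
    rw [this]
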